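-- pv_equiv track=rewrite | github.com/Robeen3242/Projects | Projects/SQL_Projects/League of Legends Build Logger/main.py | checkRowDupe
-- ===== SOURCE A (Python) =====
-- ROWS = [["Overheal", "Triumph", "Presence of Mind"], ["Legend: Alacrity", "Legend: Tenacity", "Legend: Bloodline"], ["Coup de Grace",
-- "Cut Down", "Last Stand"], ["Cheap Shot", "Taste of Blood", "Sudden Impact"], ["Zombie Ward", "Ghost Poro", "Eyeball Collection"],
-- ["Ravenous Hunter", "Ingenious Hunter", "Relentless Hunter", "Ultimate Hunter"], ["Nullifying Orb", "Manaflow Band", "Nimbus Cloak"],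
-- ["Transcendence", "Celerity", "Absolute Focus"], ["Scorch", "Waterwalking", "Gathering Storm"], ["Demolish", "Font of Life",
-- "Shield Bash"], ["Conditioning", "Second Wind", "Bone Plating"], ["Overgrowth", "Revitalize", "Unflinching"], ["Hextech Flashtraption",
-- "Magical Footwear", "Perfect Timing"], ["Future's Market", "Minion Dematerializer", "Biscuit Delivery"], ["Cosmic Insight",
-- "Approach Velocity", "Time Warp Tonic"]]
--
-- def checkRowDupe(BUILD_INFO): #Runes must not be in the same row. Due to the limitations of Python, there is no way to limit choices.
--     """Checks if the two runes are in the same row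
--
--     Args:
--         BUILD_INFO (list):
--
--     Returns:
--         bool:
--     """
--     SECONDARY_FIRST = BUILD_INFO[-7]
--     SECONDARY_SECOND = BUILD_INFO[-6]
--     CHECK = 1
--     for i in range(len(ROWS)):
--         if SECONDARY_FIRST in ROWS[i] and SECONDARY_SECOND in ROWS[i]: #Upon finding the two runes being in the same row, it will stop and return a failure.
--             CHECK = 0
--             break
--
--     if CHECK == 0:
--         return False
--     else:
--         return True
-- ===== SOURCE B (Python) =====
-- # Direct rune -> row-index table (hard-coded), so checking a row dupe is two O(1) lookups.
-- RUNE_ROW = {"Overheal": 0, "Triumph": 0, "Presence of Mind": 0, "Legend: Alacrity": 1, "Legend: Tenacity": 1, "Legend: Bloodline": 1, "Coup de Grace": 2, "Cut Down": 2, "Last Stand": 2, "Cheap Shot": 3, "Taste of Blood": 3, "Sudden Impact": 3, "Zombie Ward": 4, "Ghost Poro": 4, "Eyeball Collection": 4, "Ravenous Hunter": 5, "Ingenious Hunter": 5, "Relentless Hunter": 5, "Ultimate Hunter": 5, "Nullifying Orb": 6, "Manaflow Band": 6, "Nimbus Cloak": 6, "Transcendence": 7, "Celerity": 7, "Absolute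 Focus": 7, "Scorch": 8, "Waterwalking": 8, "Gathering Storm": 8, "Demolish": 9, "Font of Life": 9, "Shield Bash": 9, "Conditioning": 10, "Second Wind": 10, "Bone Plating": 10, "Overgrowth": 11, "Revitalize": 11, "Unflinching": 11, "Hextech Flashtraption": 12, "Magical Footwear": 12, "Perfect Timing": 12, "Future's Market": 13, "Minion Dematerializer": 13, "Biscuit Delivery": 13, "Cosmic Insight": 14, "Approach Velocity": 14, "Time Warp Tonic": 14}
--
-- def checkRowDupe(BUILD_INFO):
--     """Checks if the two runes are in the same row (rune->row table, two lookups)."""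
--     r1 = RUNE_ROW.get(BUILD_INFO[-7])
--     r2 = RUNE_ROW.get(BUILD_INFO[-6])
--     return r1 is None or r1 != r2
-- ===== Notes on version B (the rewrite author's own statement) =====
-- stated objective: idiomatic
-- what changed: Replaces the per-call scan over every row (membership-testing both runes in each row) by a hard-coded rune-to-row-index dictionary, so the function does two O(1) lookups and compares the indices (an unknown first rune counts as no dupe, matching A).
import Mathlib
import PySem

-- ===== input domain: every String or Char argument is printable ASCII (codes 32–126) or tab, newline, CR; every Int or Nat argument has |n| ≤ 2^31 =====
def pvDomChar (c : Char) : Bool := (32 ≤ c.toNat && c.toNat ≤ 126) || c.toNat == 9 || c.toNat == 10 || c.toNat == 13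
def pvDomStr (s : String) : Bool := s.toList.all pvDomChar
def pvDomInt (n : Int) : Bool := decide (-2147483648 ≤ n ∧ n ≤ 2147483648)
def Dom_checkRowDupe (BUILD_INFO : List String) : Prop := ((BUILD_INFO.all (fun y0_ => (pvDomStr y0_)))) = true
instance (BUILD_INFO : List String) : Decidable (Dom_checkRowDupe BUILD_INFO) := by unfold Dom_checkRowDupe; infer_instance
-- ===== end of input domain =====

-- B replaces A's scan of every row by a hard-coded rune→row-index dictionary with two lookups (alternative data structure; not claimed faster).


-- ===== PORT A =====
def ROWS : List (List String) := [["Overheal", "Triumph", "Presence of Mind"], ["Legend: Alacrity", "Legend: Tenacity", "Legend: Bloodline"], ["Coup de Grace",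
"Cut Down", "Last Stand"], ["Cheap Shot", "Taste of Blood", "Sudden Impact"], ["Zombie Ward", "Ghost Poro", "Eyeball Collection"],
["Ravenous Hunter", "Ingenious Hunter", "Relentless Hunter", "Ultimate Hunter"], ["Nullifying Orb", "Manaflow Band", "Nimbus Cloak"],
["Transcendence", "Celerity", "Absolute Focus"], ["Scorch", "Waterwalking", "Gathering Storm"], ["Demolish", "Font of Life",
"Shield Bash"], ["Conditioning", "Second Wind", "Bone Plating"], ["Overgrowth", "Revitalize", "Unflinching"], ["Hextech Flashtraption",
"Magical Footwear", "Perfect Timing"], ["Future's Market", "Minion Dematerializer", "Biscuit Delivery"], ["Cosmic Insight",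
"Approach Velocity", "Time Warp Tonic"]]

def checkRowDupe (BUILD_INFO : List String) : Bool :=
  match PySem.List.pyGet? BUILD_INFO (-7), PySem.List.pyGet? BUILD_INFO (-6) with
  | some SECONDARY_FIRST, some SECONDARY_SECOND =>
    -- CHECK = 1; for i in range(len(ROWS)): … CHECK = 0; break
    -- (the break is modelled by the `c = 0` guard: once CHECK is 0 the remaining iterations change nothing, the body is pure)
    let CHECK : Int := (PySem.List.pyRange 0 (ROWS.length : Int) 1).foldl
      (fun c i =>
        if c = 0 then c
        else if ((PySem.List.pyGet? ROWS i).getD []).contains SECONDARY_FIRST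
             && ((PySem.List.pyGet? ROWS i).getD []).contains SECONDARY_SECOND then 0 else c) 1
    if CHECK = 0 then false else true
  | _, _ => false   -- IndexError in Python: excluded by Pre_

-- ===== PORT B =====
-- Source B's hard-coded module-level dict literal: rune → row index
def RUNE_ROW : PySem.Dict String Int := PySem.Dict.ofList
  [("Overheal", 0), ("Triumph", 0), ("Presence of Mind", 0), ("Legend: Alacrity", 1), ("Legend: Tenacity", 1),
   ("Legend: Bloodline", 1), ("Coup de Grace", 2), ("Cut Down", 2), ("Last Stand", 2), ("Cheap Shot", 3),
   ("Taste of Blood", 3), ("Sudden Impact", 3), ("Zombie Ward", 4), ("Ghost Poro", 4), ("Eyeball Collection", 4),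
   ("Ravenous Hunter", 5), ("Ingenious Hunter", 5), ("Relentless Hunter", 5), ("Ultimate Hunter", 5),
   ("Nullifying Orb", 6), ("Manaflow Band", 6), ("Nimbus Cloak", 6), ("Transcendence", 7), ("Celerity", 7),
   ("Absolute Focus", 7), ("Scorch", 8), ("Waterwalking", 8), ("Gathering Storm", 8), ("Demolish", 9),
   ("Font of Life", 9), ("Shield Bash", 9), ("Conditioning", 10), ("Second Wind", 10), ("Bone Plating", 10),
   ("Overgrowth", 11), ("Revitalize", 11), ("Unflinching", 11), ("Hextech Flashtraption", 12),
   ("Magical Footwear", 12), ("Perfect Timing", 12), ("Future's Market", 13), ("Minion Dematerializer", 13),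
   ("Biscuit Delivery", 13), ("Cosmic Insight", 14), ("Approach Velocity", 14), ("Time Warp Tonic", 14)]

def checkRowDupe_alt (BUILD_INFO : List String) : Bool :=
  match PySem.List.pyGet? BUILD_INFO (-7) with
  | none => false   -- IndexError in Python: excluded by Pre_
  | some a =>
    match PySem.List.pyGet? BUILD_INFO (-6) with
    | none => false   -- IndexError in Python: excluded by Pre_
    | some b =>
      let r1 := RUNE_ROW.get? a
      let r2 := RUNE_ROW.get? b
      -- r1 is None or r1 != r2
      r1 == none || !(r1 == r2)

-- ===== PRECONDITION & SPEC =====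
-- Pre_ excludes only the inputs where both Pythons raise IndexError (fewer than 7 build entries).
def Pre_checkRowDupe (BUILD_INFO : List String) : Prop := 7 ≤ BUILD_INFO.length
instance (BUILD_INFO : List String) : Decidable (Pre_checkRowDupe BUILD_INFO) := by unfold Pre_checkRowDupe; infer_instance
def pvWitness_checkRowDupe : List String :=
  ["a", "b", "c", "Overheal", "Triumph", "x", "y", "z"]

def Spec_checkRowDupe (BUILD_INFO : List String) (out : Bool) : Prop := out = checkRowDupe_alt BUILD_INFO
instance (BUILD_INFO : List String) (out : Bool) : Decidable (Spec_checkRowDupe BUILD_INFO out) := by unfold Spec_checkRowDupe; infer_instance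

-- ===== CLAIM (what is proved, stated in full; the proofs are below) =====
def Claim_equal_checkRowDupe : Prop := ∀ (BUILD_INFO : List String), Dom_checkRowDupe BUILD_INFO → Pre_checkRowDupe BUILD_INFO → Spec_checkRowDupe BUILD_INFO (checkRowDupe BUILD_INFO)

-- ===== LEMMAS AND PROOFS =====

-- proof-side recursive view of the rune→row table as built from A's ROWS
def buildD (d : PySem.Dict String Int) (k : Int) : List (List String) → PySem.Dict String Int
  | [] => d
  | row :: rest => buildD (row.foldl (fun d2 r => d2.insert r k) d) (k + 1) rest

set_option maxRecDepth 4096 in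
theorem rune_row_eq_buildD : RUNE_ROW = buildD PySem.Dict.empty 0 ROWS := by decide

set_option maxRecDepth 4096 in
theorem rows_flatten_nodup : ROWS.flatten.Nodup := by decide

theorem get?_insert_row (row : List String) (d : PySem.Dict String Int) (k : Int) (x : String) :
    (row.foldl (fun d2 r => d2.insert r k) d).get? x
      = if x ∈ row then some k else d.get? x := by
  induction row generalizing d with
  | nil => simp
  | cons r rest ih =>
    rw [List.foldl_cons, ih]
    by_cases hx : x ∈ rest
    · simp [hx]
    · by_cases hrx : r = x
      · subst hrx; simp [hx, PySem.Dict.get?_insert_self]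
      · simp [hx, PySem.Dict.get?_insert_of_ne _ _ (Ne.symm hrx), Ne.symm hrx]

theorem get?_buildD (rows : List (List String)) (d : PySem.Dict String Int) (k : Int) (x : String)
    (h : rows.countP (fun r => decide (x ∈ r)) ≤ 1) :
    (buildD d k rows).get? x
      = match rows.findIdx? (fun r => decide (x ∈ r)) with
        | some j => some (k + j)
        | none => d.get? x := by
  induction rows generalizing d k with
  | nil => simp [buildD]
  | cons row rest ih =>
    rw [buildD, List.findIdx?_cons]
    by_cases hrow : x ∈ row
    · have hrest : rest.countP (fun r => decide (x ∈ r)) = 0 := by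
        rw [List.countP_cons] at h; simp only [hrow, decide_true, if_true] at h; omega
      have hnone : rest.findIdx? (fun r => decide (x ∈ r)) = none := by
        rw [List.findIdx?_eq_none_iff]
        intro r hr
        simpa using List.countP_eq_zero.mp hrest r hr
      rw [ih _ _ (by omega), hnone]
      simp [hrow, get?_insert_row]
    · have h' : rest.countP (fun r => decide (x ∈ r)) ≤ 1 := by
        rw [List.countP_cons] at h; omega
      rw [ih _ _ h']
      simp only [hrow, decide_false, if_neg, Bool.false_eq_true, not_false_iff]
      cases hfi : rest.findIdx? (fun r => decide (x ∈ r)) with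
      | none => simp [get?_insert_row, hrow]
      | some j => simp; ring

theorem foldl_loop_zero (p : List String → Bool) (rows : List (List String)) :
    rows.foldl (fun (c : Int) row =>
      if c = 0 then c else if p row then 0 else c) 0 = 0 := by
  induction rows with
  | nil => rfl
  | cons row rest ih => simpa using ih

theorem foldl_loop_eq_any (p : List String → Bool) (rows : List (List String)) :
    rows.foldl (fun (c : Int) row =>
      if c = 0 then c else if p row then 0 else c) 1
      = if rows.any p then 0 else 1 := by
  induction rows with
  | nil => rfl
  | cons row rest ih =>
    by_cases hc : p row = true
    · simp [hc, foldl_loop_zero]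
    · simp [hc, ih]

theorem any_eq_findIdx_match (rows : List (List String)) (f s : String)
    (hf : rows.countP (fun r => decide (f ∈ r)) ≤ 1)
    (hs : rows.countP (fun r => decide (s ∈ r)) ≤ 1) :
    rows.any (fun row => decide (f ∈ row) && decide (s ∈ row))
      = match rows.findIdx? (fun r => decide (f ∈ r)), rows.findIdx? (fun r => decide (s ∈ r)) with
        | some j1, some j2 => j1 == j2
        | _, _ => false := by
  induction rows with
  | nil => rfl
  | cons row rest ih =>
    rw [List.any_cons, List.findIdx?_cons, List.findIdx?_cons]
    rw [List.countP_cons] at hf hs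
    by_cases hcf : f ∈ row
    · by_cases hcs : s ∈ row
      · simp [hcf, hcs]
      · have hrest : rest.countP (fun r => decide (f ∈ r)) = 0 := by
          simp only [hcf, decide_true, if_true] at hf; omega
        have hany : rest.any (fun row => decide (f ∈ row) && decide (s ∈ row)) = false := by
          rw [List.any_eq_false]
          intro r hr
          have := List.countP_eq_zero.mp hrest r hr
          simp at this ⊢
          intro hmem; exact absurd hmem this
        cases hfi : rest.findIdx? (fun r => decide (s ∈ r)) with
        | none => simp [hcf, hcs, hany]
        | some j => simp [hcf, hcs, hany]
    · by_cases hcs : s ∈ row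
      case pos =>
        have hrest : rest.countP (fun r => decide (s ∈ r)) = 0 := by
          simp only [hcs, decide_true, if_true] at hs; omega
        have hany : rest.any (fun row => decide (f ∈ row) && decide (s ∈ row)) = false := by
          rw [List.any_eq_false]
          intro r hr
          have := List.countP_eq_zero.mp hrest r hr
          simp at this ⊢
          intro _; exact this
        cases hfi : rest.findIdx? (fun r => decide (f ∈ r)) with
        | none => simp [hcf, hcs, hany]
        | some j => simp [hcf, hcs, hany]
      case neg =>
        have hf' : rest.countP (fun r => decide (f ∈ r)) ≤ 1 := by omega
        have hs' : rest.countP (fun r => decide (s ∈ r)) ≤ 1 := by omega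
        rw [ih hf' hs']
        cases hff : rest.findIdx? (fun r => decide (f ∈ r)) with
        | none => simp [hcf, hcs]
        | some j1 =>
          cases hss : rest.findIdx? (fun r => decide (s ∈ r)) with
          | none => simp [hcf, hcs]
          | some j2 => simp [hcf, hcs]

theorem countP_le_one (x : String) : ROWS.countP (fun r => decide (x ∈ r)) ≤ 1 := by
  have h := rows_flatten_nodup
  generalize ROWS = rows at h ⊢
  induction rows with
  | nil => simp
  | cons row rest ih =>
    rw [List.flatten_cons, List.nodup_append] at h
    obtain ⟨_, hrest, hdisj⟩ := h
    rw [List.countP_cons]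
    by_cases hc : x ∈ row
    · have : rest.countP (fun r => decide (x ∈ r)) = 0 := by
        rw [List.countP_eq_zero]
        intro r hr
        simp only [decide_eq_true_eq]
        intro hxr
        exact absurd rfl (hdisj x hc x (List.mem_flatten.mpr ⟨r, hr, hxr⟩))
      simp [hc, this]
    · have := ih hrest
      simp [hc]
      omega

theorem pyRange_fold_eq (f s : String) :
    (PySem.List.pyRange 0 (ROWS.length : Int) 1).foldl
      (fun (c : Int) i =>
        if c = 0 then c
        else if decide (f ∈ (PySem.List.pyGet? ROWS i).getD [])
             && decide (s ∈ (PySem.List.pyGet? ROWS i).getD []) then 0 else c) 1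
    = ROWS.foldl (fun (c : Int) row =>
        if c = 0 then c
        else if decide (f ∈ row) && decide (s ∈ row) then 0 else c) 1 := rfl

-- ===== VERDICT (by name: the statement is the Claim_ definition above) =====
theorem checkRowDupe_spec : Claim_equal_checkRowDupe := by
  intro BUILD_INFO _hDom hPre
  have hPre' : 7 ≤ BUILD_INFO.length := hPre
  unfold Spec_checkRowDupe checkRowDupe checkRowDupe_alt
  cases h7 : PySem.List.pyGet? BUILD_INFO (-7) with
  | none =>
    exact absurd (show PySem.Raise.InRange BUILD_INFO.length (-7) by
        unfold PySem.Raise.InRange; omega)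
      ((PySem.List.pyGet?_eq_none_iff _ _).mp h7)
  | some f =>
  cases h6 : PySem.List.pyGet? BUILD_INFO (-6) with
  | none =>
    exact absurd (show PySem.Raise.InRange BUILD_INFO.length (-6) by
        unfold PySem.Raise.InRange; omega)
      ((PySem.List.pyGet?_eq_none_iff _ _).mp h6)
  | some s =>
  simp only [List.contains_eq_mem]
  rw [pyRange_fold_eq,
    foldl_loop_eq_any (fun row => decide (f ∈ row) && decide (s ∈ row)) ROWS,
    any_eq_findIdx_match ROWS f s (countP_le_one f) (countP_le_one s),
    rune_row_eq_buildD,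
    get?_buildD ROWS _ 0 f (countP_le_one f),
    get?_buildD ROWS _ 0 s (countP_le_one s)]
  cases hff : ROWS.findIdx? (fun r => decide (f ∈ r)) with
  | none => simp
  | some j1 =>
    cases hss : ROWS.findIdx? (fun r => decide (s ∈ r)) with
    | none => simp
    | some j2 =>
      by_cases hj : j1 = j2
      · subst hj; simp
      · simp [hj]
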